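-- pv_equiv track=rewrite | github.com/bmmc15/rook-agent | rook/cli/app.py | _normalize_transcript_text
-- ===== SOURCE A (Python) =====
-- def _normalize_transcript_text(text: str) -> str:
--     """Clean up streaming transcript spacing for display."""
--     text = " ".join(text.split())
--
--     # Heal common ASR artifacts where letters of the same word are split apart.
--     while "  " in text:
--         text = text.replace("  ", " ")
--
--     for punctuation in (".", ",", "!", "?", ";", ":"):
--         text = text.replace(f" {punctuation}", punctuation)
--
--     words = text.split(" ")
--     healed_words: list[str] = []
--     i = 0
--     while i < len(words):
--         word = words[i]
--         if len(word) == 1 and word.isalpha():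
--             j = i
--             merged = []
--             while j < len(words) and len(words[j]) == 1 and words[j].isalpha():
--                 merged.append(words[j])
--                 j += 1
--             if len(merged) >= 3:
--                 healed_words.append("".join(merged))
--                 i = j
--                 continue
--
--         healed_words.append(word)
--         i += 1
--
--     return " ".join(healed_words).strip()
-- ===== SOURCE B (Python) =====
-- def _normalize_transcript_text(text: str) -> str:
--     """Clean up streaming transcript spacing for display."""
--     text = " ".join(text.split())
--
--     while "  " in text:
--         text = text.replace("  ", " ")
--
--     for punctuation in ".,!?;:":
--         text = text.replace(" " + punctuation, punctuation)
--
--     # One pass with a run accumulator instead of index-based rescanning.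
--     healed_words: list = []
--     run: list = []
--
--     def flush() -> None:
--         if len(run) >= 3:
--             healed_words.append("".join(run))
--         else:
--             healed_words.extend(run)
--         run.clear()
--
--     for word in text.split(" "):
--         if len(word) == 1 and word.isalpha():
--             run.append(word)
--         else:
--             flush()
--             healed_words.append(word)
--     flush()
--
--     return " ".join(healed_words).strip()
-- ===== Notes on version B (the rewrite author's own statement) =====
-- stated objective: simpler
-- what changed: The index-based healing while-loop (with its inner rescanning while and `continue`) is replaced by a single for-pass that accumulates the current run of single letters and flushes it at run boundaries; the spacing/punctuation normalization lines are kept.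
import Mathlib
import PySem

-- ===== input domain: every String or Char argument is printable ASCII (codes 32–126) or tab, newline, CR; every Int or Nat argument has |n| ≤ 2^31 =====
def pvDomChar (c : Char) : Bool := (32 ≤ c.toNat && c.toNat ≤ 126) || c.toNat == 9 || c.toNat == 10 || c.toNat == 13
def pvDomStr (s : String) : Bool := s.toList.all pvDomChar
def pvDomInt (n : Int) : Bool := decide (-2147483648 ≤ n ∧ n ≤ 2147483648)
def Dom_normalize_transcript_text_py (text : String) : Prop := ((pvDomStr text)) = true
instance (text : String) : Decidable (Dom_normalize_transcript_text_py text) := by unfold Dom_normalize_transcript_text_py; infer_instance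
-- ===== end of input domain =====

-- B replaces A's index-based healing loop (with its inner rescanning while) by a single
-- pass that keeps a run accumulator of single letters and flushes it at run ends
-- (objective: simpler decomposition, same cost); the spacing/punctuation lines are kept.

-- shared by both ports (both Pythons contain these identical normalization lines):
-- 'len(w) == 1 and w.isalpha()'
def pvKey (w : List Char) : Bool := w.length == 1 && PySem.Chars.strIsalpha w

-- 'while "  " in text: text = text.replace("  ", " ")'  (fuel only makes the loop total;
-- each executed body strictly shortens the string, so length+1 steps always suffice)
def pvCollapse : Nat → List Char → List Char
  | 0, s => s
  | n + 1, s =>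
    if PySem.Chars.isIn [' ', ' '] s then
      pvCollapse n (PySem.Chars.replace s [' ', ' '] [' '])
    else s

-- 'for punctuation in …: text = text.replace(" " + punctuation, punctuation)'
def pvPunct (s : List Char) : List Char :=
  ['.', ',', '!', '?', ';', ':'].foldl (fun t p => PySem.Chars.replace t [' ', p] [p]) s

-- ===== PORT A =====
-- the index-based while loop with the inner run-collecting while and `continue`
def pvHealA : List (List Char) → List (List Char)
  | [] => []
  | w :: rest =>
    if pvKey w then
      let merged := w :: rest.takeWhile pvKey
      if 3 ≤ merged.length then
        PySem.Chars.join [] merged :: pvHealA (rest.dropWhile pvKey)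
      else w :: pvHealA rest
    else w :: pvHealA rest
termination_by ws => ws.length
decreasing_by
  · simpa using Nat.lt_succ_of_le (List.length_dropWhile_le pvKey rest)
  · simp
  · simp

def normalize_transcript_text_py (text : String) : String :=
  let t0 := PySem.Chars.join [' '] (PySem.Chars.split₀ text.toList)
  let t1 := pvCollapse t0.length t0
  let t2 := pvPunct t1
  let words := PySem.Chars.splitOn t2 [' ']
  String.mk (PySem.Chars.strip (PySem.Chars.join [' '] (pvHealA words)))

-- ===== PORT B =====
-- 'flush()': emit the pending run of single letters
def pvFlush (run healed : List (List Char)) : List (List Char) :=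
  if 3 ≤ run.length then healed ++ [PySem.Chars.join [] run] else healed ++ run

-- the single 'for word in words' pass over state (healed_words, run)
def pvStepB (st : List (List Char) × List (List Char)) (w : List Char) :
    List (List Char) × List (List Char) :=
  if pvKey w then (st.1, st.2 ++ [w]) else (pvFlush st.2 st.1 ++ [w], [])

def pvHealB (words : List (List Char)) : List (List Char) :=
  let st := words.foldl pvStepB ([], [])
  pvFlush st.2 st.1

def normalize_transcript_text_py_alt (text : String) : String :=
  let t0 := PySem.Chars.join [' '] (PySem.Chars.split₀ text.toList)
  let t1 := pvCollapse t0.length t0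
  let t2 := pvPunct t1
  let words := PySem.Chars.splitOn t2 [' ']
  String.mk (PySem.Chars.strip (PySem.Chars.join [' '] (pvHealB words)))

-- ===== PRECONDITION & SPEC =====
def Spec_normalize_transcript_text_py (text : String) (out : String) : Prop := out = normalize_transcript_text_py_alt text
instance (text : String) (out : String) : Decidable (Spec_normalize_transcript_text_py text out) := by unfold Spec_normalize_transcript_text_py; infer_instance

-- ===== CLAIM (what is proved, stated in full; the proofs are below) =====
def Claim_equal_normalize_transcript_text_py : Prop := ∀ (text : String), Dom_normalize_transcript_text_py text → Spec_normalize_transcript_text_py text (normalize_transcript_text_py text)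

-- ===== LEMMAS AND PROOFS =====

-- a run of key-words followed by a word that is not a key (or nothing)
def pvBoundary (ws : List (List Char)) : Prop :=
  ws = [] ∨ ∃ v vs, ws = v :: vs ∧ pvKey v = false

theorem pvTakeDrop (r ws : List (List Char)) (hr : ∀ x ∈ r, pvKey x = true)
    (hb : pvBoundary ws) :
    (r ++ ws).takeWhile pvKey = r ∧ (r ++ ws).dropWhile pvKey = ws := by
  induction r with
  | nil =>
    simp only [List.nil_append]
    rcases hb with h | ⟨v, vs, h, hv⟩
    · subst h; simp
    · subst h; simp [List.takeWhile, List.dropWhile, hv]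
  | cons a r ih =>
    have ha : pvKey a = true := hr a (by simp)
    have := ih (fun x hx => hr x (by simp [hx]))
    simp [ha, this.1, this.2]

theorem pvHealA_run (r ws : List (List Char)) (hr : ∀ x ∈ r, pvKey x = true)
    (hb : pvBoundary ws) :
    pvHealA (r ++ ws) =
      (if 3 ≤ r.length then [PySem.Chars.join [] r] else r) ++ pvHealA ws := by
  by_cases h3 : 3 ≤ r.length
  · obtain ⟨a, r', rfl⟩ : ∃ a r', r = a :: r' := by
      cases r with
      | nil => simp at h3
      | cons a r' => exact ⟨a, r', rfl⟩
    have ha : pvKey a = true := hr a (by simp)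
    have htd := pvTakeDrop r' ws (fun x hx => hr x (by simp [hx])) hb
    rw [List.cons_append, pvHealA]
    simp only [ha, htd.1, htd.2]
    simp only [List.length_cons] at h3 ⊢
    rw [if_pos trivial, if_pos (show 3 ≤ r'.length + 1 by omega)]
    simp
    rw [if_pos (show 2 ≤ r'.length by omega)]
    simp
  · -- r has length 0, 1 or 2
    match r, hr with
    | [], _ => simp
    | [a], hr =>
      have ha : pvKey a = true := hr a (by simp)
      have htd0 := pvTakeDrop [] ws (by intro x hx; simp at hx) hb
      simp only [List.nil_append] at htd0
      rw [List.singleton_append, pvHealA]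
      simp [ha, htd0.1]
    | [a, b], hr =>
      have ha : pvKey a = true := hr a (by simp)
      have hbk : pvKey b = true := hr b (by simp)
      have htd := pvTakeDrop [b] ws (by intro x hx; simp at hx; simp [hx, hbk]) hb
      have htd0 := pvTakeDrop [] ws (by intro x hx; simp at hx) hb
      simp only [List.nil_append] at htd0
      rw [List.cons_append, List.singleton_append, pvHealA]
      have h1 : (b :: ws).takeWhile pvKey = [b] := by simpa using htd.1
      simp only [ha, h1]
      have hlt : ¬ 3 ≤ ([a, b] : List (List Char)).length := by simp
      rw [if_pos trivial, if_neg hlt, if_neg hlt]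
      rw [pvHealA]
      simp [hbk, htd0.1]
    | a :: b :: c :: r', hr => exact absurd (by simp) h3

theorem pvHealA_all (r : List (List Char)) (hr : ∀ x ∈ r, pvKey x = true) :
    pvHealA r = if 3 ≤ r.length then [PySem.Chars.join [] r] else r := by
  have := pvHealA_run r [] hr (Or.inl rfl)
  simpa [pvHealA] using this

theorem pvHealA_run_flush (r h : List (List Char)) (hr : ∀ x ∈ r, pvKey x = true) :
    pvFlush r h = h ++ pvHealA r := by
  rw [pvHealA_all r hr, pvFlush]
  split <;> simp

theorem pvHealB_loop (ws : List (List Char)) :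
    ∀ (r h : List (List Char)), (∀ x ∈ r, pvKey x = true) →
      pvFlush (ws.foldl pvStepB (h, r)).2 (ws.foldl pvStepB (h, r)).1
        = h ++ pvHealA (r ++ ws) := by
  induction ws with
  | nil =>
    intro r h hr
    simp only [List.foldl_nil, List.append_nil]
    exact pvHealA_run_flush r h hr
  | cons w ws ih =>
    intro r h hr
    by_cases hw : pvKey w = true
    · have hstep : pvStepB (h, r) w = (h, r ++ [w]) := by simp [pvStepB, hw]
      rw [List.foldl_cons, hstep]
      have hr' : ∀ x ∈ r ++ [w], pvKey x = true := by
        intro x hx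
        rcases List.mem_append.1 hx with hx | hx
        · exact hr x hx
        · simp at hx; subst hx; exact hw
      rw [ih (r ++ [w]) h hr']
      simp
    · have hwf : pvKey w = false := by simpa using hw
      have hstep : pvStepB (h, r) w = (pvFlush r h ++ [w], []) := by simp [pvStepB, hwf]
      rw [List.foldl_cons, hstep]
      rw [ih [] (pvFlush r h ++ [w]) (by simp)]
      rw [pvHealA_run r (w :: ws) hr (Or.inr ⟨w, ws, rfl, hwf⟩)]
      rw [pvHealA_run_flush r h hr, pvHealA_all r hr]
      rw [pvHealA]
      rw [List.nil_append]
      simp [hwf]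

theorem pvHeal_eq (ws : List (List Char)) : pvHealB ws = pvHealA ws := by
  have := pvHealB_loop ws [] [] (by simp)
  simpa [pvHealB] using this

-- ===== VERDICT (by name: the statement is the Claim_ definition above) =====
theorem normalize_transcript_text_py_spec : Claim_equal_normalize_transcript_text_py := by
  intro text _
  show normalize_transcript_text_py text = normalize_transcript_text_py_alt text
  simp only [normalize_transcript_text_py, normalize_transcript_text_py_alt, pvHeal_eq]
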